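-- pv_equiv track=rewrite | github.com/NeuralBlitz/fishstick | fishstick/knowledge_graph/schema.py | _infer_symmetric_relations
-- ===== SOURCE A (Python) =====
-- from typing import Dict, List, Set, Optional, Tuple, Any, Callable
-- from collections import defaultdict
--
-- def _infer_symmetric_relations(
--
--     triplets: List[Tuple[str, str, str]],
--     min_frequency: int,
-- ) -> Set[str]:
--     """Infer symmetric relations."""
--     relation_pairs: Dict[str, Set[Tuple[str, str]]] = defaultdict(set)
--
--     for s, p, o in triplets:
--         relation_pairs[p].add((s, o))
--
--     symmetric = set()
--
--     for rel, pairs in relation_pairs.items():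
--         symmetric_count = 0
--         for s, o in pairs:
--             if (o, s) in pairs:
--                 symmetric_count += 1
--
--         if symmetric_count >= min_frequency:
--             symmetric.add(rel)
--
--     return symmetric
-- ===== SOURCE B (Python) =====
-- from collections import Counter
-- from typing import List, Set, Tuple
--
--
-- def _infer_symmetric_relations(
--     triplets: List[Tuple[str, str, str]],
--     min_frequency: int,
-- ) -> Set[str]:
--     """Group deduplicated triples by their unordered (relation, {s, o}) key.
--
--     A triple counts as symmetric iff s == o or its unordered group contains
--     both orientations (group size 2); no reverse-membership lookup is needed.
--     """
--     uniq = {(p, s, o) for s, p, o in triplets}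
--     groups = Counter((p, min(s, o), max(s, o)) for p, s, o in uniq)
--     sym_count = Counter()
--     for p, s, o in uniq:
--         if s == o or groups[(p, min(s, o), max(s, o))] == 2:
--             sym_count[p] += 1
--     relations = {p for _, p, _ in triplets}
--     return {p for p in relations if sym_count[p] >= min_frequency}
-- ===== Notes on version B (the rewrite author's own statement) =====
-- stated objective: alternative
-- what changed: Instead of A's dict of per-relation pair-sets with a nested loop testing reverse-pair membership, B groups the deduplicated triples by an unordered canonical key (p, min(s,o), max(s,o)) with one Counter and reads symmetry off the group sizes (s == o or group size 2), so no reverse-membership lookup is performed.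
import Mathlib
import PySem

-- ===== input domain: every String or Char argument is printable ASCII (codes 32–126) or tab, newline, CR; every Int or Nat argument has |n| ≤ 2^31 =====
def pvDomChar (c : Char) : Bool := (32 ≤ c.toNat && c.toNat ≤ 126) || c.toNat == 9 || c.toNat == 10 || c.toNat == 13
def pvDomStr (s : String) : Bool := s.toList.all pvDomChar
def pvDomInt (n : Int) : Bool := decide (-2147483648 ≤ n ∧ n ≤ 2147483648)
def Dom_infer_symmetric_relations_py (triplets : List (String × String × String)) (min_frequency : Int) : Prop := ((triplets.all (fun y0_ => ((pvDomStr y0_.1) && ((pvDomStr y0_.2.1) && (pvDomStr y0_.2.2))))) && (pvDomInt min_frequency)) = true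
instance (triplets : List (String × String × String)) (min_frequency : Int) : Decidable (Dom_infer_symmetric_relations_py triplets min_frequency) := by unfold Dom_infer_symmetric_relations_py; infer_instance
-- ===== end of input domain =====

-- B groups the deduplicated triples by an unordered canonical key (p, min(s,o), max(s,o)) and reads
-- symmetry off the group sizes, instead of A's dict-of-pair-sets with a per-relation reverse-membership
-- loop (alternative decomposition; same asymptotic cost).
-- Python A returns a set; the ports return its elements as a list in first-insertion order.

-- ===== PORT A =====
def infer_symmetric_relations_py (triplets : List (String × String × String)) (min_frequency : Int) : List String :=
  let relation_pairs : PySem.Dict String (PySem.Set (String × String)) :=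
    triplets.foldl (fun d t =>
      d.modify t.2.1 PySem.Set.empty (fun ps => PySem.Set.add ps (t.1, t.2.2))) PySem.Dict.empty
  let symmetric : PySem.Set String :=
    relation_pairs.items.foldl (fun sym it =>
      let symmetric_count : Int :=
        it.2.foldl (fun c pr => if (pr.2, pr.1) ∈ it.2 then c + 1 else c) 0
      if symmetric_count ≥ min_frequency then PySem.Set.add sym it.1 else sym) PySem.Set.empty
  symmetric

-- ===== PORT B =====
-- the unordered key (p, min(s, o), max(s, o)) of a triple stored as (p, s, o)
def pvCanon (t : String × String × String) : String × String × String :=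
  (t.1, min t.2.1 t.2.2, max t.2.1 t.2.2)

def infer_symmetric_relations_py_alt (triplets : List (String × String × String)) (min_frequency : Int) : List String :=
  let uniq : PySem.Set (String × String × String) :=
    PySem.Set.ofList (triplets.map (fun t => (t.2.1, t.1, t.2.2)))
  let groups : PySem.Dict (String × String × String) Int :=
    PySem.Dict.counter ((uniq : List _).map pvCanon)
  let sym_count : PySem.Dict String Int :=
    (uniq : List _).foldl (fun d t =>
      if t.2.1 = t.2.2 ∨ groups.getD (pvCanon t) 0 = 2 then d.modify t.1 0 (· + 1) else d)
      PySem.Dict.empty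
  let relations : PySem.Set String := PySem.Set.ofList (triplets.map (fun t => t.2.1))
  relations.filter (fun p => sym_count.getD p 0 ≥ min_frequency)

-- ===== PRECONDITION & SPEC =====
def Spec_infer_symmetric_relations_py (triplets : List (String × String × String)) (min_frequency : Int) (out : List String) : Prop := out = infer_symmetric_relations_py_alt triplets min_frequency
instance (triplets : List (String × String × String)) (min_frequency : Int) (out : List String) : Decidable (Spec_infer_symmetric_relations_py triplets min_frequency out) := by unfold Spec_infer_symmetric_relations_py; infer_instance

-- ===== CLAIM (what is proved, stated in full; the proofs are below) =====
def Claim_equal_infer_symmetric_relations_py : Prop := ∀ (triplets : List (String × String × String)) (min_frequency : Int), Dom_infer_symmetric_relations_py triplets min_frequency → Spec_infer_symmetric_relations_py triplets min_frequency (infer_symmetric_relations_py triplets min_frequency)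

-- ===== LEMMAS AND PROOFS =====

-- pair x is stored under relation k in the flat triple list S iff (k, x) is in S
lemma pv_mem_pairs_iff (S : List (String × String × String)) (k : String) (x : String × String) :
    x ∈ (S.filter (fun t => t.1 == k)).map (fun t => t.2) ↔ (k, x) ∈ S := by
  simp only [List.mem_map, List.mem_filter, beq_iff_eq]
  constructor
  · rintro ⟨t, ⟨hS, hk⟩, h2⟩
    have : t = (k, x) := by cases t; simp_all
    exact this ▸ hS
  · intro h
    exact ⟨(k, x), ⟨h, rfl⟩, rfl⟩

-- A's dict and B's two flat sets stay in lock-step: relations in order, and per-relation pair lists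
lemma pv_inv (ts : List (String × String × String)) :
    ∀ (d : PySem.Dict String (PySem.Set (String × String)))
      (S : PySem.Set (String × String × String)) (R : PySem.Set String),
    R = d.keys →
    (∀ p, ((S : List _).filter (fun t => t.1 == p)).map (fun t => t.2) = d.getD p PySem.Set.empty) →
    ts.foldl (fun R t => PySem.Set.add R t.2.1) R
      = (ts.foldl (fun d t => d.modify t.2.1 PySem.Set.empty (fun ps => PySem.Set.add ps (t.1, t.2.2))) d).keys ∧
    (∀ p, (((ts.foldl (fun S t => PySem.Set.add S (t.2.1, t.1, t.2.2)) S) : List _).filter (fun t => t.1 == p)).map (fun t => t.2)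
      = (ts.foldl (fun d t => d.modify t.2.1 PySem.Set.empty (fun ps => PySem.Set.add ps (t.1, t.2.2))) d).getD p PySem.Set.empty) := by
  induction ts with
  | nil => intro d S R h1 h2; exact ⟨h1, h2⟩
  | cons t ts ih =>
    intro d S R h1 h2
    simp only [List.foldl_cons]
    apply ih
    · -- keys step
      rw [PySem.Dict.keys_modify]
      by_cases hc : d.contains t.2.1 = true
      · rw [PySem.Dict.keys_insert_of_contains _ _ hc,
            PySem.Set.add_of_mem (h1 ▸ (PySem.Dict.contains_iff_mem_keys d t.2.1).mp hc)]
        exact h1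
      · have hnm : t.2.1 ∉ d.keys :=
          fun hm => hc ((PySem.Dict.contains_iff_mem_keys d t.2.1).mpr hm)
        rw [PySem.Dict.keys_insert_of_not_contains _ _ (by simpa using hc), h1,
            PySem.Set.add_of_not_mem hnm]
    · -- per-relation pair-list step
      intro p
      by_cases hp : p = t.2.1
      · subst hp
        rw [PySem.Dict.getD_modify_self]
        have hmem : (t.2.1, t.1, t.2.2) ∈ (S : List _) ↔ (t.1, t.2.2) ∈ d.getD t.2.1 PySem.Set.empty := by
          rw [← h2 t.2.1]; exact (pv_mem_pairs_iff S t.2.1 (t.1, t.2.2)).symm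
        rw [PySem.Set.add_eq_ite, PySem.Set.add_eq_ite]
        by_cases hin : (t.2.1, t.1, t.2.2) ∈ (S : List _)
        · rw [if_pos hin, if_pos (hmem.mp hin), h2 t.2.1]
        · rw [if_neg hin, if_neg (fun h => hin (hmem.mpr h)), List.filter_append,
              List.map_append, h2 t.2.1]
          simp
      · rw [PySem.Dict.getD_modify_of_ne _ _ _ hp]
        rw [PySem.Set.add_eq_ite]
        by_cases hin : (t.2.1, t.1, t.2.2) ∈ (S : List _)
        · rw [if_pos hin, h2 p]
        · rw [if_neg hin, List.filter_append, List.map_append, ← h2 p]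
          have : ((([(t.2.1, t.1, t.2.2)] : List (String × String × String)).filter
              (fun t => t.1 == p)).map (fun t => t.2)) = [] := by
            simp [Ne.symm hp]
          rw [this, List.append_nil]

-- a conditional Set.add loop over fresh, distinct keys is a filter
lemma pv_foldl_add_if {β : Type} (C : String × β → Prop) [DecidablePred C] :
    ∀ (l : List (String × β)) (acc : PySem.Set String),
    (l.map Prod.fst).Nodup → (∀ a ∈ l, a.1 ∉ acc) →
    l.foldl (fun sym it => if C it then PySem.Set.add sym it.1 else sym) acc
      = acc ++ (l.filter (fun a => decide (C a))).map Prod.fst := by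
  intro l
  induction l with
  | nil => simp
  | cons a l ih =>
    intro acc hnd hfresh
    have hnd' : (l.map Prod.fst).Nodup := (List.nodup_cons.mp hnd).2
    have hna : a.1 ∉ l.map Prod.fst := (List.nodup_cons.mp hnd).1
    simp only [List.foldl_cons]
    by_cases hC : C a
    · rw [if_pos hC, PySem.Set.add_of_not_mem (hfresh a (by simp))]
      rw [ih (acc ++ [a.1]) hnd' ?_]
      · simp [hC]
      · intro b hb
        simp only [List.mem_append, List.mem_singleton]
        rintro (h | h)
        · exact hfresh b (by simp [hb]) h
        · exact hna (h ▸ List.mem_map_of_mem hb)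
    · rw [if_neg hC, ih acc hnd' (fun b hb => hfresh b (by simp [hb]))]
      simp [hC]

-- the conditional counting loop of B computes a filtered count
lemma pv_cnt_dict (C : String × String × String → Prop) [DecidablePred C] :
    ∀ (l : List (String × String × String)) (dd : PySem.Dict String Int) (k : String),
    (l.foldl (fun dd t => if C t then dd.modify t.1 0 (· + 1) else dd) dd).getD k 0
      = dd.getD k 0 + ((l.filter (fun t => decide (C t) && t.1 == k)).length : Int) := by
  intro l
  induction l with
  | nil => simp
  | cons t l ih =>
    intro dd k
    simp only [List.foldl_cons, List.filter_cons]
    by_cases hC : C t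
    · rw [if_pos hC]
      by_cases hk : t.1 = k
      · subst hk
        rw [ih]
        rw [PySem.Dict.getD_modify_self]
        simp [hC]
        omega
      · rw [ih, PySem.Dict.getD_modify_of_ne _ _ _ (Ne.symm hk)]
        simp [hC, hk]
    · rw [if_neg hC, ih]
      simp [hC]

-- equal min and equal max of two pairs force the pairs equal up to swapping
lemma pv_minmax {α : Type} [LinearOrder α] {a b c d : α}
    (h1 : min a b = min c d) (h2 : max a b = max c d) :
    (a = c ∧ b = d) ∨ (a = d ∧ b = c) := by
  rcases le_total a b with hab | hab <;> rcases le_total c d with hcd | hcd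
  · rw [min_eq_left hab, min_eq_left hcd] at h1
    rw [max_eq_right hab, max_eq_right hcd] at h2
    exact Or.inl ⟨h1, h2⟩
  · rw [min_eq_left hab, min_eq_right hcd] at h1
    rw [max_eq_right hab, max_eq_left hcd] at h2
    exact Or.inr ⟨h1, h2⟩
  · rw [min_eq_right hab, min_eq_left hcd] at h1
    rw [max_eq_left hab, max_eq_right hcd] at h2
    exact Or.inr ⟨h2, h1⟩
  · rw [min_eq_right hab, min_eq_right hcd] at h1
    rw [max_eq_left hab, max_eq_left hcd] at h2
    exact Or.inl ⟨h2, h1⟩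

-- two triples share a canonical key iff they are equal or reverses of each other
lemma pv_canon_eq_iff (u t : String × String × String) :
    pvCanon u = pvCanon t ↔ (u = t ∨ u = (t.1, t.2.2, t.2.1)) := by
  obtain ⟨u1, u2, u3⟩ := u; obtain ⟨t1, t2, t3⟩ := t
  simp only [pvCanon, Prod.mk.injEq]
  constructor
  · rintro ⟨h0, h1, h2⟩
    rcases pv_minmax h1 h2 with ⟨ha, hb⟩ | ⟨ha, hb⟩ <;> simp [h0, ha, hb]
  · rintro (⟨h0, h1, h2⟩ | ⟨h0, h1, h2⟩) <;> subst h0 <;> subst h1 <;> subst h2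
    · exact ⟨rfl, rfl, rfl⟩
    · exact ⟨rfl, min_comm _ _, max_comm _ _⟩

-- counting a two-element disjunction is counting each element
lemma pv_countP_pair {α : Type} [BEq α] [LawfulBEq α] (t r : α) (hne : t ≠ r) :
    ∀ l : List α, l.countP (fun u => u == t || u == r) = l.count t + l.count r := by
  intro l
  induction l with
  | nil => simp
  | cons a l ih =>
    simp only [List.countP_cons, List.count_cons, ih]
    by_cases h1 : a = t <;> by_cases h2 : a = r
    · exact absurd (h1 ▸ h2) hne
    · simp [h1, beq_iff_eq, hne]
      try omega
    · simp [h2, beq_iff_eq, Ne.symm hne]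
      try omega
    · simp [h1, h2, beq_iff_eq]
      try omega

-- over the deduplicated triples, B's group-size test agrees with "the reverse triple is present"
lemma pv_group_mem (S : List (String × String × String)) (hnd : S.Nodup)
    (t : String × String × String) (ht : t ∈ S) :
    (t.2.1 = t.2.2 ∨ (S.map pvCanon).count (pvCanon t) = 2) ↔ (t.1, t.2.2, t.2.1) ∈ S := by
  have hcnt : (S.map pvCanon).count (pvCanon t)
      = S.countP (fun u => u == t || u == (t.1, t.2.2, t.2.1)) := by
    rw [List.count_eq_countP, List.countP_map]
    apply List.countP_congr
    intro u _
    have h := pv_canon_eq_iff u t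
    by_cases hb : pvCanon u = pvCanon t
    · have hrhs : (u == t || u == (t.1, t.2.2, t.2.1)) = true := by
        rcases h.mp hb with h' | h' <;> simp [h']
      simp [hb, hrhs]
    · have h1 : ¬ u = t := fun h' => hb (h.mpr (Or.inl h'))
      have h2 : ¬ u = (t.1, t.2.2, t.2.1) := fun h' => hb (h.mpr (Or.inr h'))
      simp [hb, h1, h2]
  by_cases hso : t.2.1 = t.2.2
  · have hrev : (t.1, t.2.2, t.2.1) = t := by
      obtain ⟨a, b, c⟩ := t; simp only at hso; rw [hso]
    exact iff_of_true (Or.inl hso) (by rw [hrev]; exact ht)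
  · have hne : t ≠ (t.1, t.2.2, t.2.1) := by
      obtain ⟨a, b, c⟩ := t
      simp only [Prod.mk.injEq, ne_eq, not_and]
      intro _ h _; exact absurd h hso
    rw [hcnt, pv_countP_pair _ _ hne S, List.count_eq_one_of_mem hnd ht]
    by_cases hr : (t.1, t.2.2, t.2.1) ∈ S
    · rw [List.count_eq_one_of_mem hnd hr]
      simp [hr]
    · rw [List.count_eq_zero.mpr hr]
      simp [hr, hso]

-- ===== VERDICT (by name: the statement is the Claim_ definition above) =====
theorem infer_symmetric_relations_py_spec : Claim_equal_infer_symmetric_relations_py := by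
  intro triplets min_frequency _
  unfold Spec_infer_symmetric_relations_py infer_symmetric_relations_py infer_symmetric_relations_py_alt
  simp only []
  -- names for the built structures
  set d := triplets.foldl (fun d t => d.modify t.2.1 PySem.Set.empty (fun ps => PySem.Set.add ps (t.1, t.2.2))) PySem.Dict.empty with hd
  -- B's flat sets are folds over the triplets
  have hSfold : (PySem.Set.ofList (triplets.map (fun t => (t.2.1, t.1, t.2.2))) : List _)
      = triplets.foldl (fun S t => PySem.Set.add S (t.2.1, t.1, t.2.2)) PySem.Set.empty := by
    rw [PySem.Set.ofList_eq_foldl, List.foldl_map]; rfl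
  have hRfold : (PySem.Set.ofList (triplets.map (fun t => t.2.1)) : List _)
      = triplets.foldl (fun R t => PySem.Set.add R t.2.1) PySem.Set.empty := by
    rw [PySem.Set.ofList_eq_foldl, List.foldl_map]; rfl
  set S := (PySem.Set.ofList (triplets.map (fun t => (t.2.1, t.1, t.2.2))) : PySem.Set _) with hSdef
  obtain ⟨h1, h2⟩ := pv_inv triplets PySem.Dict.empty PySem.Set.empty PySem.Set.empty rfl (by intro p; rfl)
  rw [← hd] at h1 h2
  rw [← hSfold] at h2
  rw [← hRfold] at h1
  have hnodS : (S : List _).Nodup := PySem.Set.nodup_ofList _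
  have hnd : d.keys.Nodup := by
    rw [hd]
    exact PySem.Dict.nodup_keys_foldl_modify_key triplets (fun t => t.2.1) PySem.Set.empty
      (fun _ t ps => PySem.Set.add ps (t.1, t.2.2)) PySem.Dict.empty PySem.Dict.nodup_keys_empty
  -- A's outer loop is a filter over the items (keys are fresh and distinct)
  rw [PySem.Dict.items_eq_map_keys d hnd PySem.Set.empty]
  rw [pv_foldl_add_if _ _ PySem.Set.empty
      (by simp only [List.map_map, Function.comp_def]; simpa using hnd)
      (by intro a _ h; simp [PySem.Set.empty] at h)]
  rw [List.filter_map, List.map_map]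
  rw [show (PySem.Set.empty : PySem.Set String) = ([] : List String) from rfl, List.nil_append]
  simp only [Function.comp_def]
  rw [List.map_id']
  -- B's output is a filter over the same key list
  rw [h1]
  apply List.filter_congr
  intro k hk
  -- B's count at k
  rw [pv_cnt_dict _ (S : List _) PySem.Dict.empty k]
  rw [show (PySem.Dict.empty.getD k 0 : Int) = 0 from rfl, zero_add]
  -- A's count over the pair set of k
  have hc := PySem.List.foldl_count_if
    (fun pr => decide ((pr.2, pr.1) ∈ d.getD k PySem.Set.empty))
    (d.getD k PySem.Set.empty : List (String × String)) 0
  simp only [decide_eq_true_eq] at hc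
  rw [hc, zero_add, List.countP_eq_length_filter]
  -- rewrite A's pair list to the filtered flat list
  have hpairs := h2 k
  have hlen : ((d.getD k PySem.Set.empty : List (String × String)).filter
        (fun pr => decide ((pr.2, pr.1) ∈ d.getD k PySem.Set.empty))).length
      = (((S : List _).filter (fun t => t.1 == k)).filter
        (fun t => decide ((t.2.2, t.2.1) ∈ d.getD k PySem.Set.empty))).length := by
    rw [← hpairs, List.filter_map, List.length_map]
    rfl
  -- B's filter agrees with A's, elementwise over the deduplicated triples
  have hsplit : ((S : List _).filter
        (fun t => decide (t.2.1 = t.2.2 ∨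
            (PySem.Dict.counter ((S : List _).map pvCanon)).getD (pvCanon t) 0 = 2) && (t.1 == k)))
      = ((S : List _).filter (fun t => t.1 == k)).filter
        (fun t => decide ((t.2.2, t.2.1) ∈ d.getD k PySem.Set.empty)) := by
    rw [List.filter_filter]
    apply List.filter_congr
    intro t htS
    by_cases hkt : t.1 = k
    · have hg : (PySem.Dict.counter ((S : List _).map pvCanon)).getD (pvCanon t) 0
          = (((S : List _).map pvCanon).count (pvCanon t) : Int) :=
        PySem.Dict.getD_counter _ _
      have hmemS : ((t.2.2, t.2.1) ∈ d.getD k PySem.Set.empty) ↔ ((k, t.2.2, t.2.1) ∈ (S : List _)) := by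
        rw [← hpairs]; exact pv_mem_pairs_iff S k (t.2.2, t.2.1)
      have hrev : ((k, t.2.2, t.2.1) ∈ (S : List _)) ↔ ((t.1, t.2.2, t.2.1) ∈ (S : List _)) := by
        rw [hkt]
      have hcond : (t.2.1 = t.2.2 ∨
            (PySem.Dict.counter ((S : List _).map pvCanon)).getD (pvCanon t) 0 = 2)
          ↔ ((t.2.2, t.2.1) ∈ d.getD k PySem.Set.empty) := by
        rw [hmemS, hrev, ← pv_group_mem (S : List _) hnodS t htS, hg]
        constructor
        · rintro (h | h)
          · exact Or.inl h
          · exact Or.inr (by exact_mod_cast h)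
        · rintro (h | h)
          · exact Or.inl h
          · exact Or.inr (by exact_mod_cast h)
      congr 1
      rw [decide_eq_decide]
      exact hcond
    · have hf : (t.1 == k) = false := by simp [hkt]
      rw [hf, Bool.and_false, Bool.and_false]
  rw [hlen, ← hsplit]
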